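-- pv_equiv track=rewrite | github.com/deesatzed/CAM-Pulse | src/claw/cycle.py | _compute_workspace_change
-- ===== SOURCE A (Python) =====
-- def _compute_workspace_change(before: dict[str, str], after: dict[str, str]) -> tuple[list[str], str]:
--     changed_paths = sorted(set(before.keys()) | set(after.keys()))
--     files_changed = [path for path in changed_paths if before.get(path) != after.get(path)]
--     if not files_changed:
--         return [], ""
--
--     lines: list[str] = []
--     for path in files_changed:
--         if path not in before:
--             lines.append(f"+++ {path}")
--         elif path not in after:
--             lines.append(f"--- {path}")
--         else:
--             lines.append(f"*** {path}")
--     return files_changed, "\n".join(lines)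
-- ===== SOURCE B (Python) =====
-- def _compute_workspace_change(before: dict[str, str], after: dict[str, str]) -> tuple[list[str], str]:
--     bs = sorted(before)
--     ts = sorted(after)
--     i = j = 0
--     paths: list[str] = []
--     lines: list[str] = []
--     while i < len(bs) and j < len(ts):
--         p, q = bs[i], ts[j]
--         if p < q:
--             paths.append(p)
--             lines.append(f"--- {p}")
--             i += 1
--         elif q < p:
--             paths.append(q)
--             lines.append(f"+++ {q}")
--             j += 1
--         else:
--             if before[p] != after[p]:
--                 paths.append(p)
--                 lines.append(f"*** {p}")
--             i += 1
--             j += 1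
--     while i < len(bs):
--         p = bs[i]
--         paths.append(p)
--         lines.append(f"--- {p}")
--         i += 1
--     while j < len(ts):
--         q = ts[j]
--         paths.append(q)
--         lines.append(f"+++ {q}")
--         j += 1
--     return paths, "\n".join(lines)
-- ===== Notes on version B (the rewrite author's own statement) =====
-- stated objective: alternative
-- what changed: A sorts the union of all keys, filters it by a get()-inequality and then re-classifies each changed path by dict membership tests; B sorts the two key lists separately and runs a single two-pointer merge-join that classifies (added/deleted/modified) and formats each path as it is emitted, with no union set, no filter pass and no membership tests.
import Mathlib
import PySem

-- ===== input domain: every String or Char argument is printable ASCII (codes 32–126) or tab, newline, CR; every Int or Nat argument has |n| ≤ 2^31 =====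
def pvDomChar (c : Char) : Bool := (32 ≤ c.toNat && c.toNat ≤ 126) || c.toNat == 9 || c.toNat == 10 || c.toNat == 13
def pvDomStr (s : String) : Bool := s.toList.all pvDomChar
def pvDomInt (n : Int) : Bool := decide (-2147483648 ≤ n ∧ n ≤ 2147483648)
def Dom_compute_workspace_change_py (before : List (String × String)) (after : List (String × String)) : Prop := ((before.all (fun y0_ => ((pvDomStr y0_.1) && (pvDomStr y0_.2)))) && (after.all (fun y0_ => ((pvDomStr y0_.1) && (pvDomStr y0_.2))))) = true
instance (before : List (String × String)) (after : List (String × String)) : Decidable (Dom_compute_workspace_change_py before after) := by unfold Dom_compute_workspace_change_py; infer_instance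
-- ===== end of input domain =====

-- B replaces A's sorted-union filter plus membership re-classification by a two-pointer
-- merge-join of the two separately sorted key lists that classifies and formats each path
-- as it is emitted (objective: alternative algorithm, same cost).


-- ===== PORT A =====
def compute_workspace_change_py (before : List (String × String)) (after : List (String × String)) : List String × String :=
  let db := PySem.Dict.ofList before
  let da := PySem.Dict.ofList after
  let changed_paths := PySem.List.sorted
    (PySem.Set.union (PySem.Set.ofList db.keys) (PySem.Set.ofList da.keys)) (fun p => p)
  let files_changed := changed_paths.filter (fun p => db.get? p ≠ da.get? p)
  if files_changed = [] then ([], "")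
  else
    let lines := files_changed.foldl (fun acc p =>
      acc ++ [if ¬ db.contains p then "+++ " ++ p
              else if ¬ da.contains p then "--- " ++ p
              else "*** " ++ p]) []
    (files_changed, PySem.Str.join "\n" lines)

-- ===== PORT B =====
-- the while loop plus the two tail loops of Source B, as the obvious structural recursion
-- on the two remaining suffixes (emitting front-to-back instead of appending)
def pvMergeB (db da : PySem.Dict String String) : List String → List String → List String × List String
  | [], ts => (ts, ts.map (fun q => "+++ " ++ q))
  | p :: bs, [] => (p :: bs, (p :: bs).map (fun x => "--- " ++ x))
  | p :: bs, q :: ts =>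
    if p < q then
      let r := pvMergeB db da bs (q :: ts)
      (p :: r.1, ("--- " ++ p) :: r.2)
    else if q < p then
      let r := pvMergeB db da (p :: bs) ts
      (q :: r.1, ("+++ " ++ q) :: r.2)
    else
      -- here p = q is in both dicts, so get? is Python's before[p] / after[p]
      let r := pvMergeB db da bs ts
      if db.get? p ≠ da.get? p then (p :: r.1, ("*** " ++ p) :: r.2) else r
termination_by bs ts => bs.length + ts.length
decreasing_by all_goals (simp; try omega)

def compute_workspace_change_py_alt (before : List (String × String)) (after : List (String × String)) : List String × String :=
  let db := PySem.Dict.ofList before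
  let da := PySem.Dict.ofList after
  let bs := PySem.List.sorted db.keys (fun p => p)
  let ts := PySem.List.sorted da.keys (fun p => p)
  let r := pvMergeB db da bs ts
  (r.1, PySem.Str.join "\n" r.2)

-- ===== PRECONDITION & SPEC =====
def Spec_compute_workspace_change_py (before : List (String × String)) (after : List (String × String)) (out : List String × String) : Prop := out = compute_workspace_change_py_alt before after
instance (before : List (String × String)) (after : List (String × String)) (out : List String × String) : Decidable (Spec_compute_workspace_change_py before after out) := by unfold Spec_compute_workspace_change_py; infer_instance

-- ===== CLAIM (what is proved, stated in full; the proofs are below) =====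
def Claim_equal_compute_workspace_change_py : Prop := ∀ (before : List (String × String)) (after : List (String × String)), Dom_compute_workspace_change_py before after → Spec_compute_workspace_change_py before after (compute_workspace_change_py before after)

-- ===== LEMMAS AND PROOFS =====

-- plain sorted merge of the two key lists (proof-side skeleton of pvMergeB)
def pvMergeK : List String → List String → List String
  | [], ts => ts
  | p :: bs, [] => p :: bs
  | p :: bs, q :: ts =>
    if p < q then p :: pvMergeK bs (q :: ts)
    else if q < p then q :: pvMergeK (p :: bs) ts
    else p :: pvMergeK bs ts
termination_by bs ts => bs.length + ts.length
decreasing_by all_goals (simp; try omega)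

def pvKeep (db da : PySem.Dict String String) (bs ts : List String) (p : String) : Bool :=
  if p ∈ bs ∧ p ∈ ts then decide (db.get? p ≠ da.get? p) else true

def pvMark (bs ts : List String) (p : String) : String :=
  if p ∈ bs then (if p ∈ ts then "*** " ++ p else "--- " ++ p) else "+++ " ++ p

lemma mem_pvMergeK : ∀ (bs ts : List String) (x : String), x ∈ pvMergeK bs ts ↔ x ∈ bs ∨ x ∈ ts := by
  intro bs ts
  induction bs, ts using pvMergeK.induct with
  | case1 ts => simp [pvMergeK]
  | case2 p bs => simp [pvMergeK]
  | case3 p bs q ts h ih =>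
    intro x; simp only [pvMergeK, if_pos h, List.mem_cons, ih]; tauto
  | case4 p bs q ts h1 h2 ih =>
    intro x; simp only [pvMergeK, if_neg h1, if_pos h2, List.mem_cons, ih]; tauto
  | case5 p bs q ts h1 h2 ih =>
    intro x
    have hpq : p = q := le_antisymm (not_lt.mp h2) (not_lt.mp h1)
    simp only [pvMergeK, if_neg h1, if_neg h2, List.mem_cons, ih]
    subst hpq; tauto

lemma pairwise_pvMergeK : ∀ (bs ts : List String), bs.Pairwise (· < ·) → ts.Pairwise (· < ·) →
    (pvMergeK bs ts).Pairwise (· < ·) := by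
  intro bs ts
  induction bs, ts using pvMergeK.induct with
  | case1 ts => intro _ h; simpa [pvMergeK] using h
  | case2 p bs => intro h _; simpa [pvMergeK] using h
  | case3 p bs q ts h ih =>
    intro hb ht
    rw [List.pairwise_cons] at hb
    simp only [pvMergeK, if_pos h, List.pairwise_cons]
    refine ⟨?_, ih hb.2 ht⟩
    intro x hx
    rcases (mem_pvMergeK bs (q :: ts) x).mp hx with hx | hx
    · exact hb.1 x hx
    · rcases List.mem_cons.mp hx with rfl | hx
      · exact h
      · exact lt_trans h ((List.pairwise_cons.mp ht).1 x hx)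
  | case4 p bs q ts h1 h2 ih =>
    intro hb ht
    rw [List.pairwise_cons] at ht
    simp only [pvMergeK, if_neg h1, if_pos h2, List.pairwise_cons]
    refine ⟨?_, ih hb ht.2⟩
    intro x hx
    rcases (mem_pvMergeK (p :: bs) ts x).mp hx with hx | hx
    · rcases List.mem_cons.mp hx with rfl | hx
      · exact h2
      · exact lt_trans h2 ((List.pairwise_cons.mp hb).1 x hx)
    · exact ht.1 x hx
  | case5 p bs q ts h1 h2 ih =>
    intro hb ht
    have hpq : p = q := le_antisymm (not_lt.mp h2) (not_lt.mp h1)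
    subst hpq
    rw [List.pairwise_cons] at hb ht
    simp only [pvMergeK, if_neg h1, List.pairwise_cons]
    refine ⟨?_, ih hb.2 ht.2⟩
    intro x hx
    rcases (mem_pvMergeK bs ts x).mp hx with hx | hx
    · exact hb.1 x hx
    · exact ht.1 x hx

-- everything the merge of the tails emits is strictly above the consumed head,
-- so keep/mark relative to the shrunken lists agree with the full lists
lemma pvMergeB_spec (db da : PySem.Dict String String) :
    ∀ (bs ts : List String), bs.Pairwise (· < ·) → ts.Pairwise (· < ·) →
    pvMergeB db da bs ts =
      ((pvMergeK bs ts).filter (pvKeep db da bs ts),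
       ((pvMergeK bs ts).filter (pvKeep db da bs ts)).map (pvMark bs ts)) := by
  intro bs ts
  induction bs, ts using pvMergeK.induct with
  | case1 ts =>
    intro _ _
    have hf : ∀ x ∈ ts, pvKeep db da [] ts x = true := by
      intro x _; simp [pvKeep]
    rw [show pvMergeB db da [] ts = (ts, ts.map (fun q => "+++ " ++ q)) by rw [pvMergeB]]
    rw [show pvMergeK [] ts = ts by rw [pvMergeK], List.filter_eq_self.mpr hf]
    refine Prod.ext rfl ?_
    exact (List.map_congr_left (fun x hx => by simp [pvMark])).symm
  | case2 p bs =>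
    intro _ _
    have hf : ∀ x ∈ p :: bs, pvKeep db da (p :: bs) [] x = true := by
      intro x _; simp [pvKeep]
    rw [show pvMergeB db da (p :: bs) [] = (p :: bs, (p :: bs).map (fun x => "--- " ++ x)) by rw [pvMergeB]]
    rw [show pvMergeK (p :: bs) [] = p :: bs by rw [pvMergeK], List.filter_eq_self.mpr hf]
    refine Prod.ext rfl ?_
    exact (List.map_congr_left (fun x hx => by simp [pvMark, hx])).symm
  | case3 p bs q ts h ih =>
    intro hb ht
    rw [List.pairwise_cons] at hb
    have hqts := List.pairwise_cons.mp ht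
    -- p is below everything the recursive merge can emit
    have hgt : ∀ x, x ∈ pvMergeK bs (q :: ts) → p < x := by
      intro x hx
      rcases (mem_pvMergeK bs (q :: ts) x).mp hx with hx | hx
      · exact hb.1 x hx
      · rcases List.mem_cons.mp hx with rfl | hx
        · exact h
        · exact lt_trans h (hqts.1 x hx)
    have hne : ∀ x, x ∈ pvMergeK bs (q :: ts) → x ≠ p := fun x hx => (hgt x hx).ne'
    have hpk : pvKeep db da (p :: bs) (q :: ts) p = true := by
      have hpq : p ∉ q :: ts := by
        intro hx
        rcases List.mem_cons.mp hx with rfl | hx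
        · exact lt_irrefl p h
        · exact lt_irrefl p (lt_trans h (hqts.1 p hx))
      simp [pvKeep, hpq]
    have hkeq : ∀ x ∈ pvMergeK bs (q :: ts),
        pvKeep db da bs (q :: ts) x = pvKeep db da (p :: bs) (q :: ts) x := by
      intro x hx; simp [pvKeep, List.mem_cons, hne x hx]
    have hmeq : ∀ x ∈ (pvMergeK bs (q :: ts)).filter (pvKeep db da bs (q :: ts)),
        pvMark bs (q :: ts) x = pvMark (p :: bs) (q :: ts) x := by
      intro x hx
      have := hne x (List.mem_of_mem_filter hx)
      simp [pvMark, List.mem_cons, this]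
    have hmk : pvMark (p :: bs) (q :: ts) p = "--- " ++ p := by
      have hpq : p ∉ q :: ts := by
        intro hx
        rcases List.mem_cons.mp hx with rfl | hx
        · exact lt_irrefl p h
        · exact lt_irrefl p (lt_trans h (hqts.1 p hx))
      simp [pvMark, hpq]
    rw [show pvMergeB db da (p :: bs) (q :: ts) =
          (p :: (pvMergeB db da bs (q :: ts)).1, ("--- " ++ p) :: (pvMergeB db da bs (q :: ts)).2) by
        rw [pvMergeB]; simp [h]]
    rw [ih hb.2 ht]
    rw [show pvMergeK (p :: bs) (q :: ts) = p :: pvMergeK bs (q :: ts) by rw [pvMergeK]; simp [h]]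
    rw [List.filter_cons_of_pos hpk, ← List.filter_congr hkeq]
    refine Prod.ext rfl ?_
    simp only [List.map_cons, hmk]
    exact congrArg _ (List.map_congr_left hmeq)
  | case4 p bs q ts h1 h2 ih =>
    intro hb ht
    rw [List.pairwise_cons] at ht
    have hpbs := List.pairwise_cons.mp hb
    have hgt : ∀ x, x ∈ pvMergeK (p :: bs) ts → q < x := by
      intro x hx
      rcases (mem_pvMergeK (p :: bs) ts x).mp hx with hx | hx
      · rcases List.mem_cons.mp hx with rfl | hx
        · exact h2
        · exact lt_trans h2 (hpbs.1 x hx)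
      · exact ht.1 x hx
    have hne : ∀ x, x ∈ pvMergeK (p :: bs) ts → x ≠ q := fun x hx => (hgt x hx).ne'
    have hqb : q ∉ p :: bs := by
      intro hx
      rcases List.mem_cons.mp hx with rfl | hx
      · exact lt_irrefl q h2
      · exact lt_irrefl q (lt_trans h2 (hpbs.1 q hx))
    have hpk : pvKeep db da (p :: bs) (q :: ts) q = true := by simp [pvKeep, hqb]
    have hkeq : ∀ x ∈ pvMergeK (p :: bs) ts,
        pvKeep db da (p :: bs) ts x = pvKeep db da (p :: bs) (q :: ts) x := by
      intro x hx; simp [pvKeep, List.mem_cons, hne x hx]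
    have hmeq : ∀ x ∈ (pvMergeK (p :: bs) ts).filter (pvKeep db da (p :: bs) ts),
        pvMark (p :: bs) ts x = pvMark (p :: bs) (q :: ts) x := by
      intro x hx
      have := hne x (List.mem_of_mem_filter hx)
      simp [pvMark, List.mem_cons, this]
    have hmk : pvMark (p :: bs) (q :: ts) q = "+++ " ++ q := by simp [pvMark, hqb]
    rw [show pvMergeB db da (p :: bs) (q :: ts) =
          (q :: (pvMergeB db da (p :: bs) ts).1, ("+++ " ++ q) :: (pvMergeB db da (p :: bs) ts).2) by
        rw [pvMergeB]; simp [h1, h2]]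
    rw [ih hb ht.2]
    rw [show pvMergeK (p :: bs) (q :: ts) = q :: pvMergeK (p :: bs) ts by
        rw [pvMergeK]; simp [h1, h2]]
    rw [List.filter_cons_of_pos hpk, ← List.filter_congr hkeq]
    refine Prod.ext rfl ?_
    simp only [List.map_cons, hmk]
    exact congrArg _ (List.map_congr_left hmeq)
  | case5 p bs q ts h1 h2 ih =>
    intro hb ht
    have hpq : p = q := le_antisymm (not_lt.mp h2) (not_lt.mp h1)
    subst hpq
    rw [List.pairwise_cons] at hb ht
    have hgt : ∀ x, x ∈ pvMergeK bs ts → p < x := by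
      intro x hx
      rcases (mem_pvMergeK bs ts x).mp hx with hx | hx
      · exact hb.1 x hx
      · exact ht.1 x hx
    have hne : ∀ x, x ∈ pvMergeK bs ts → x ≠ p := fun x hx => (hgt x hx).ne'
    have hpk : pvKeep db da (p :: bs) (p :: ts) p = decide (db.get? p ≠ da.get? p) := by
      simp [pvKeep]
    have hkeq : ∀ x ∈ pvMergeK bs ts,
        pvKeep db da bs ts x = pvKeep db da (p :: bs) (p :: ts) x := by
      intro x hx; simp [pvKeep, List.mem_cons, hne x hx]
    have hmeq : ∀ x ∈ (pvMergeK bs ts).filter (pvKeep db da bs ts),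
        pvMark bs ts x = pvMark (p :: bs) (p :: ts) x := by
      intro x hx
      have := hne x (List.mem_of_mem_filter hx)
      simp [pvMark, List.mem_cons, this]
    have hmk : pvMark (p :: bs) (p :: ts) p = "*** " ++ p := by simp [pvMark]
    rw [show pvMergeK (p :: bs) (p :: ts) = p :: pvMergeK bs ts by
        rw [pvMergeK]; simp]
    by_cases hv : db.get? p ≠ da.get? p
    · rw [show pvMergeB db da (p :: bs) (p :: ts) =
            (p :: (pvMergeB db da bs ts).1, ("*** " ++ p) :: (pvMergeB db da bs ts).2) by
          rw [pvMergeB]; simp [hv]]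
      rw [ih hb.2 ht.2]
      rw [List.filter_cons_of_pos (by rw [hpk]; exact decide_eq_true hv),
        ← List.filter_congr hkeq]
      refine Prod.ext rfl ?_
      simp only [List.map_cons, hmk]
      exact congrArg _ (List.map_congr_left hmeq)
    · rw [show pvMergeB db da (p :: bs) (p :: ts) = pvMergeB db da bs ts by
          rw [pvMergeB]; simp [hv]]
      rw [ih hb.2 ht.2]
      rw [List.filter_cons_of_neg (by rw [hpk]; simpa using hv), ← List.filter_congr hkeq]
      refine Prod.ext rfl ?_
      exact List.map_congr_left hmeq

-- ===== VERDICT (by name: the statement is the Claim_ definition above) =====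
theorem compute_workspace_change_py_spec : Claim_equal_compute_workspace_change_py := by
  intro before after _
  unfold Spec_compute_workspace_change_py
  unfold compute_workspace_change_py compute_workspace_change_py_alt
  simp only []
  set db := PySem.Dict.ofList before (ν := String) with hdb
  set da := PySem.Dict.ofList after (ν := String) with hda
  set bs := PySem.List.sorted db.keys (fun p => p) with hbs
  set ts := PySem.List.sorted da.keys (fun p => p) with hts
  have hbnd : db.keys.Nodup := PySem.Dict.nodup_keys_ofList before
  have hand : da.keys.Nodup := PySem.Dict.nodup_keys_ofList after
  have hbsp : bs.Pairwise (· < ·) := by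
    have h1 := PySem.List.sorted_pairwise db.keys (fun p => p)
    have h2 : bs.Nodup := ((PySem.List.sorted_perm db.keys (fun p => p) false).nodup_iff).mpr hbnd
    exact (h1.and h2).imp (fun h => lt_of_le_of_ne h.1 h.2)
  have htsp : ts.Pairwise (· < ·) := by
    have h1 := PySem.List.sorted_pairwise da.keys (fun p => p)
    have h2 : ts.Nodup := ((PySem.List.sorted_perm da.keys (fun p => p) false).nodup_iff).mpr hand
    exact (h1.and h2).imp (fun h => lt_of_le_of_ne h.1 h.2)
  -- the merge skeleton is exactly A's sorted key union
  have hmk : PySem.List.sorted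
      (PySem.Set.union (PySem.Set.ofList db.keys) (PySem.Set.ofList da.keys)) (fun p => p)
      = pvMergeK bs ts := by
    apply PySem.List.sorted_eq_of_perm_of_pairwise_lt
    · apply (List.perm_ext_iff_of_nodup
        ((pairwise_pvMergeK bs ts hbsp htsp).imp ne_of_lt)
        (PySem.Set.nodup_union _ _ (PySem.Set.nodup_ofList _))).mpr
      intro x
      simp [mem_pvMergeK, hbs, hts, PySem.List.mem_sorted, PySem.Set.mem_union,
        PySem.Set.mem_ofList]
    · exact pairwise_pvMergeK bs ts hbsp htsp
  rw [hmk, pvMergeB_spec db da bs ts hbsp htsp]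
  -- A's get?-inequality filter is the merge's keep predicate
  have hkeq : ∀ x ∈ pvMergeK bs ts,
      (decide (db.get? x ≠ da.get? x)) = pvKeep db da bs ts x := by
    intro x hx
    by_cases hboth : x ∈ bs ∧ x ∈ ts
    · simp [pvKeep, hboth]
    · have hun : x ∈ bs ∨ x ∈ ts := (mem_pvMergeK bs ts x).mp hx
      have hone : (x ∈ db.keys ∧ x ∉ da.keys) ∨ (x ∉ db.keys ∧ x ∈ da.keys) := by
        simp only [hbs, hts, PySem.List.mem_sorted] at hun hboth
        tauto
      have hne : db.get? x ≠ da.get? x := by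
        rcases hone with ⟨h1, h2⟩ | ⟨h1, h2⟩
        · have e2 : da.get? x = none := (PySem.Dict.get?_eq_none_iff_not_mem_keys da x).mpr h2
          intro h; exact (PySem.Dict.get?_eq_none_iff_not_mem_keys db x).mp (h.trans e2) h1
        · have e1 : db.get? x = none := (PySem.Dict.get?_eq_none_iff_not_mem_keys db x).mpr h1
          intro h; exact (PySem.Dict.get?_eq_none_iff_not_mem_keys da x).mp (h.symm.trans e1) h2
      simp [pvKeep, hboth, hne]
  rw [List.filter_congr hkeq]
  set L := (pvMergeK bs ts).filter (pvKeep db da bs ts) with hL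
  -- A's membership classification is the merge's marker
  have hmeq : ∀ x ∈ L,
      (if ¬ db.contains x then "+++ " ++ x
       else if ¬ da.contains x then "--- " ++ x
       else "*** " ++ x) = pvMark bs ts x := by
    intro x hxL
    have hcb : db.contains x = true ↔ x ∈ bs := by
      rw [PySem.Dict.contains_iff_mem_keys]; simp [hbs, PySem.List.mem_sorted]
    have hca : da.contains x = true ↔ x ∈ ts := by
      rw [PySem.Dict.contains_iff_mem_keys]; simp [hts, PySem.List.mem_sorted]
    by_cases hxb : x ∈ bs <;> by_cases hxt : x ∈ ts <;>
      simp [pvMark, hxb, hxt, hcb, hca]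
  simp only []
  split_ifs with h
  · rw [h]; rfl
  · rw [PySem.List.foldl_append_singleton_eq_map, List.nil_append]
    refine Prod.ext rfl ?_
    exact congrArg (PySem.Str.join "\n") (List.map_congr_left hmeq)
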